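-- pv_equiv track=rewrite | github.com/Francovasquezz/sopaDeLetras | TPO_Grupo3.py | unirLetras
-- ===== SOURCE A (Python) =====
-- def unirLetras (mat,coorX1,coorY1,coorX2,coorY2):
--     palabra = mat[coorX1][coorY1] #palabra que se forma entre las coordenadas enviadas
--     while coorX1 != coorX2 or coorY1 != coorY2:
--         if coorX1 < coorX2:
--             coorX1 += 1
--         elif coorX1 > coorX2:
--             coorX1 -= 1
--
--         if coorY1 < coorY2:
--             coorY1 += 1
--         elif coorY1 > coorY2:
--             coorY1 -= 1
--         palabra = palabra + mat[coorX1][coorY1]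
--     return palabra
-- ===== SOURCE B (Python) =====
-- def unirLetras(mat, coorX1, coorY1, coorX2, coorY2):
--     dx = coorX2 - coorX1
--     dy = coorY2 - coorY1
--     sx = (dx > 0) - (dx < 0)
--     sy = (dy > 0) - (dy < 0)
--     n = max(abs(dx), abs(dy))
--     return ''.join(mat[coorX1 + sx * min(i, abs(dx))][coorY1 + sy * min(i, abs(dy))]
--                    for i in range(n + 1))
-- ===== Notes on version B (the rewrite author's own statement) =====
-- stated objective: alternative
-- what changed: Replaces the incremental while-loop that mutates the coordinates step by step with a closed-form index computation: precompute the step count n=max(|dx|,|dy|) and build the string with ''.join over range(n+1), clamping each axis independently with min(i,|d|).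
import Mathlib
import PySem

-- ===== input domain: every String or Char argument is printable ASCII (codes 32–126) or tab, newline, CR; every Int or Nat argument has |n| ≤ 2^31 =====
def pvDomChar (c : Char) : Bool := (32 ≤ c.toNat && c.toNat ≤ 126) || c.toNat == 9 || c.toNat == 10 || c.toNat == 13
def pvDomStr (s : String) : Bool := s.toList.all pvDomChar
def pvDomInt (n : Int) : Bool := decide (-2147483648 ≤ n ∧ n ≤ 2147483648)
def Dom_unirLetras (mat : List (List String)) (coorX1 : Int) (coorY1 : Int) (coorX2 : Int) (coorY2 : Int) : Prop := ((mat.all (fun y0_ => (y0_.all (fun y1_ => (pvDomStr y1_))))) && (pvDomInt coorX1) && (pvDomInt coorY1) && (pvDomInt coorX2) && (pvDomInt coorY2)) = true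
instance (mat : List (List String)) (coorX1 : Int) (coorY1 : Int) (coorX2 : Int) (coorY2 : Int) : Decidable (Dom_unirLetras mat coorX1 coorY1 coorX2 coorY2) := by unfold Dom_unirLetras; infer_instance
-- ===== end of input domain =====

-- B replaces A's incremental coordinate-mutating while loop by a closed-form
-- coordinate formula joined over range(n+1); same values everywhere A returns.

-- mat[x][y] (Python indexing, negative indices wrap); the getD defaults are only
-- reached outside Pre_unirLetras (where the Python raises IndexError).
def pyCell (mat : List (List String)) (x y : Int) : String :=
  (PySem.List.pyGet? ((PySem.List.pyGet? mat x).getD []) y).getD ""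

-- ===== PORT A =====
-- one body of A's while loop: move coorX1 / coorY1 one step toward the target
def pyStep (c ct : Int) : Int := if c < ct then c + 1 else if ct < c then c - 1 else c

-- A's while loop; the fuel is exactly the number of iterations the loop performs
-- (each iteration decreases max(|coorX2-coorX1|,|coorY2-coorY1|) by one).
def unirLetrasLoop (mat : List (List String)) (coorX2 coorY2 : Int) :
    Nat → Int → Int → String → String
  | 0, _, _, palabra => palabra
  | fuel + 1, coorX1, coorY1, palabra =>
    if coorX1 ≠ coorX2 ∨ coorY1 ≠ coorY2 then
      let x' := pyStep coorX1 coorX2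
      let y' := pyStep coorY1 coorY2
      unirLetrasLoop mat coorX2 coorY2 fuel x' y' (palabra ++ pyCell mat x' y')
    else palabra

def unirLetras (mat : List (List String)) (coorX1 : Int) (coorY1 : Int) (coorX2 : Int) (coorY2 : Int) : String :=
  unirLetrasLoop mat coorX2 coorY2 (max (coorX2 - coorX1).natAbs (coorY2 - coorY1).natAbs)
    coorX1 coorY1 (pyCell mat coorX1 coorY1)

-- ===== PORT B =====
-- (dx > 0) - (dx < 0)
def psign (d : Int) : Int := (if 0 < d then 1 else 0) - (if d < 0 then 1 else 0)

def unirLetras_alt (mat : List (List String)) (coorX1 : Int) (coorY1 : Int) (coorX2 : Int) (coorY2 : Int) : String :=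
  let dx := coorX2 - coorX1
  let dy := coorY2 - coorY1
  let sx := psign dx
  let sy := psign dy
  let n : Int := max (dx.natAbs : Int) (dy.natAbs : Int)
  PySem.Str.join "" ((PySem.List.pyRange 0 (n + 1) 1).map
    (fun i => pyCell mat (coorX1 + sx * min i (dx.natAbs : Int))
                         (coorY1 + sy * min i (dy.natAbs : Int))))

-- ===== PRECONDITION & SPEC =====
-- the coordinate on one axis after i steps of the walk (closed form)
def axisCoord (c ct : Int) (i : Int) : Int :=
  c + psign (ct - c) * min i ((ct - c).natAbs : Int)

-- exactly the inputs where every cell the walk visits is a valid Python index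
-- (possibly negative, wrapping); elsewhere the Python A raises IndexError.
-- Stated in closed form so it is O(|mat|) to decide even for far-apart coordinates:
-- the visited x's fill the interval [min x1 x2, max x1 x2] (checked by its endpoints,
-- which also bounds |x2-x1| by 2*mat.length once it holds); the first min(|x2-x1|, 2*len)+1
-- steps are checked one by one; afterwards x is clamped at x2 and the remaining visited
-- y's fill an interval, checked by its endpoints.
def Pre_unirLetras (mat : List (List String)) (coorX1 : Int) (coorY1 : Int) (coorX2 : Int) (coorY2 : Int) : Prop :=
  let L : Int := mat.length
  let ad : Nat := min (coorX2 - coorX1).natAbs (2 * mat.length)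
  (-L ≤ min coorX1 coorX2 ∧ max coorX1 coorX2 < L) ∧
  (∀ k ∈ List.range (ad + 1),
    PySem.Raise.InRange ((PySem.List.pyGet? mat (axisCoord coorX1 coorX2 (k : Int))).getD []).length
      (axisCoord coorY1 coorY2 (k : Int))) ∧
  (-((((PySem.List.pyGet? mat coorX2).getD []).length : Int)) ≤ min (axisCoord coorY1 coorY2 (ad : Int)) coorY2 ∧
    max (axisCoord coorY1 coorY2 (ad : Int)) coorY2 < ((((PySem.List.pyGet? mat coorX2).getD []).length : Int)))

instance (mat : List (List String)) (coorX1 : Int) (coorY1 : Int) (coorX2 : Int) (coorY2 : Int) : Decidable (Pre_unirLetras mat coorX1 coorY1 coorX2 coorY2) := by unfold Pre_unirLetras; infer_instance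

def pvWitness_unirLetras : List (List String) × Int × Int × Int × Int :=
  ([["a", "b"], ["c", "d"]], 0, 0, 1, 1)

def Spec_unirLetras (mat : List (List String)) (coorX1 : Int) (coorY1 : Int) (coorX2 : Int) (coorY2 : Int) (out : String) : Prop := out = unirLetras_alt mat coorX1 coorY1 coorX2 coorY2
instance (mat : List (List String)) (coorX1 : Int) (coorY1 : Int) (coorX2 : Int) (coorY2 : Int) (out : String) : Decidable (Spec_unirLetras mat coorX1 coorY1 coorX2 coorY2 out) := by unfold Spec_unirLetras; infer_instance

-- ===== CLAIM (what is proved, stated in full; the proofs are below) =====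
def Claim_equal_unirLetras : Prop := ∀ (mat : List (List String)) (coorX1 : Int) (coorY1 : Int) (coorX2 : Int) (coorY2 : Int), Dom_unirLetras mat coorX1 coorY1 coorX2 coorY2 → Pre_unirLetras mat coorX1 coorY1 coorX2 coorY2 → Spec_unirLetras mat coorX1 coorY1 coorX2 coorY2 (unirLetras mat coorX1 coorY1 coorX2 coorY2)

-- ===== LEMMAS AND PROOFS =====

theorem str_join_nil : PySem.Str.join "" [] = "" := by
  apply String.toList_inj.mp
  simp [PySem.Str.toList_join, PySem.Chars.join_nil]

theorem str_join_cons (a : String) (l : List String) :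
    PySem.Str.join "" (a :: l) = a ++ PySem.Str.join "" l := by
  apply String.toList_inj.mp
  cases l with
  | nil =>
    simp [PySem.Str.toList_join, PySem.Chars.join,
      List.intercalate, str_join_nil]
  | cons b rest =>
    simp [PySem.Str.toList_join, String.toList_append, PySem.Chars.join_cons_cons]

theorem axisCoord_zero (c ct : Int) : axisCoord c ct 0 = c := by
  simp [axisCoord, psign]

theorem axisCoord_step (c ct : Int) (i : Int) (hi : 1 ≤ i) :
    axisCoord c ct i = axisCoord (pyStep c ct) ct (i - 1) := by
  unfold axisCoord pyStep psign
  split_ifs <;> omega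

theorem pyStep_dist (c ct : Int) : (ct - pyStep c ct).natAbs = (ct - c).natAbs - 1 := by
  unfold pyStep
  split_ifs <;> omega

theorem loop_eq (mat : List (List String)) (x2 y2 : Int) :
    ∀ (f : Nat) (x y : Int) (acc : String),
      f = max (x2 - x).natAbs (y2 - y).natAbs →
      unirLetrasLoop mat x2 y2 f x y acc =
        acc ++ PySem.Str.join "" ((List.range f).map
          (fun (k : Nat) => pyCell mat (axisCoord x x2 ((k : Int) + 1)) (axisCoord y y2 ((k : Int) + 1)))) := by
  intro f
  induction f with
  | zero =>
    intro x y acc _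
    simp [unirLetrasLoop, str_join_nil]
  | succ f ih =>
    intro x y acc h
    have hcond : x ≠ x2 ∨ y ≠ y2 := by
      by_contra hc
      push Not at hc
      obtain ⟨hx, hy⟩ := hc
      subst hx; subst hy
      simp at h
    rw [unirLetrasLoop, if_pos hcond]
    have hf : f = max (x2 - pyStep x x2).natAbs (y2 - pyStep y y2).natAbs := by
      rw [pyStep_dist, pyStep_dist]
      rcases hcond with hx | hy
      · have : (x2 - x).natAbs ≠ 0 := by omega
        omega
      · have : (y2 - y).natAbs ≠ 0 := by omega
        omega
    rw [ih (pyStep x x2) (pyStep y y2) _ hf]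
    rw [List.range_succ_eq_map, List.map_cons, List.map_map]
    rw [str_join_cons, ← String.append_assoc]
    congr 1
    · congr 1
      · rw [axisCoord_step x x2 _ (by omega), axisCoord_step y y2 _ (by omega)]
        norm_num [axisCoord_zero]
    · congr 1
      apply List.map_congr_left
      intro k _
      simp only [Function.comp]
      have h1 : ((k.succ : Nat) : Int) + 1 = ((k : Int) + 1) + 1 := by push_cast; ring
      rw [h1, axisCoord_step x x2 _ (by omega), axisCoord_step y y2 _ (by omega)]
      norm_num

theorem alt_eq (mat : List (List String)) (x1 y1 x2 y2 : Int) :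
    unirLetras_alt mat x1 y1 x2 y2 =
      PySem.Str.join "" ((List.range (max (x2 - x1).natAbs (y2 - y1).natAbs + 1)).map
        (fun (k : Nat) => pyCell mat (axisCoord x1 x2 (k : Int)) (axisCoord y1 y2 (k : Int)))) := by
  show PySem.Str.join "" ((PySem.List.pyRange 0 ((max ((x2 - x1).natAbs : Int) ((y2 - y1).natAbs : Int)) + 1) 1).map (fun i => pyCell mat (x1 + psign (x2 - x1) * min i ((x2 - x1).natAbs : Int)) (y1 + psign (y2 - y1) * min i ((y2 - y1).natAbs : Int)))) = _
  rw [PySem.List.pyRange_one, List.map_map]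
  have hn : ((max ((x2 - x1).natAbs : Int) ((y2 - y1).natAbs : Int) + 1 - 0).toNat) = max (x2 - x1).natAbs (y2 - y1).natAbs + 1 := by omega
  rw [hn]
  congr 1
  apply List.map_congr_left
  intro k _
  simp [axisCoord, Function.comp]

-- ===== VERDICT (by name: the statement is the Claim_ definition above) =====
theorem unirLetras_spec : Claim_equal_unirLetras := by
  intro mat x1 y1 x2 y2 _ _
  unfold Spec_unirLetras unirLetras
  rw [loop_eq mat x2 y2 _ x1 y1 _ rfl, alt_eq]
  rw [List.range_succ_eq_map, List.map_cons, List.map_map, str_join_cons]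
  congr 1
  simp [axisCoord_zero]
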